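-- pv_equiv track=rewrite | github.com/maxwshen/evoracle-dataprocessinganalysis | cry1ac/src/pb_e3_interpolate_multi.py | recursive_make_genotypes
-- ===== SOURCE A (Python) =====
-- def recursive_make_genotypes(all_nts, idx):
--   # all_nts is a list of lists
--   if idx == 0:
--     return all_nts[idx]
--   else:
--     gts = recursive_make_genotypes(all_nts, idx - 1)
--     new_gts = []
--     for gt in gts:
--       for nt in all_nts[idx]:
--         new_gts.append(gt + nt)
--     return new_gts
-- ===== SOURCE B (Python) =====
-- def recursive_make_genotypes(all_nts, idx):
--   # Eliminate the recursion: stack up the pending nucleotide lists, then replay.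
--   pending = []
--   i = idx
--   while i != 0:
--     pending.append(all_nts[i])
--     i -= 1
--   gts = all_nts[0]
--   for nts in reversed(pending):
--     gts = [gt + nt for gt in gts for nt in nts]
--   return gts
-- ===== Notes on version B (the rewrite author's own statement) =====
-- stated objective: alternative
-- what changed: Eliminates the recursion: an explicit while loop stacks the pending nucleotide lists all_nts[idx..1], then a replay loop folds them over all_nts[0] with a flat comprehension instead of A's recursive call plus nested append loops.
-- outside the precondition, e.g. on recursive_make_genotypes([[]], 1): A returns [], B raises IndexError
import Mathlib
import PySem

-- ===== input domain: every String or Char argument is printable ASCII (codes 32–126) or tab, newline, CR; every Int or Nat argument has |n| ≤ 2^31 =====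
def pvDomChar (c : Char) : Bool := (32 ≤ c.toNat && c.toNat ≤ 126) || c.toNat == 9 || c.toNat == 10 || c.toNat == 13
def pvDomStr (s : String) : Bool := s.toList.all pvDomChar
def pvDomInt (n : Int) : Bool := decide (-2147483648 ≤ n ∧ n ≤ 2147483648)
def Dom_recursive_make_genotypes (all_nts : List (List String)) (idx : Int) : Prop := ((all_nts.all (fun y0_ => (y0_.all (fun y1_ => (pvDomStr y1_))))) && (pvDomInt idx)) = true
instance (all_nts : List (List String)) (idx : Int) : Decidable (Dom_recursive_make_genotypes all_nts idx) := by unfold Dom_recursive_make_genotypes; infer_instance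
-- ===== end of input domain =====

-- B eliminates A's recursion with an explicit stack of pending lists plus a replay loop; objective: alternative (same cost).

-- ===== PORT A =====
-- A's recursion on idx, expressed on Nat (A recurses forever for idx < 0; those inputs are
-- outside Pre_ and the wrapper's 'idx < 0' guard is only a totality guard).
def pvGoA (all_nts : List (List String)) : Nat → List String
  | 0 => PySem.List.pyGetD all_nts 0 []
  | n + 1 =>
    let gts := pvGoA all_nts n
    gts.foldl
      (fun new_gts gt =>
        (PySem.List.pyGetD all_nts ((n : Int) + 1) []).foldl
          (fun acc nt => acc ++ [gt ++ nt]) new_gts)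
      []

def recursive_make_genotypes (all_nts : List (List String)) (idx : Int) : List String :=
  if idx < 0 then [] else pvGoA all_nts idx.toNat

-- ===== PORT B =====
-- B's first while loop: walk i from idx down to 0, pushing all_nts[i].
-- Python raises IndexError where pyGet? is none (the loop in Source B ends that way for every
-- idx < 0: i walks below -len(all_nts)); those inputs are outside Pre_ and the port stops there.
def pvCollect (all_nts : List (List String)) (i : Int) (pending : List (List String)) : List (List String) :=
  if i = 0 then pending
  else
    match h2 : PySem.List.pyGet? all_nts i with
    | none => pending
    | some nts => pvCollect all_nts (i - 1) (pending ++ [nts])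
termination_by (i + all_nts.length + 1).toNat
decreasing_by
  have hin : PySem.Raise.InRange all_nts.length i := by
    by_contra hc
    rw [← PySem.List.pyGet?_eq_none_iff] at hc
    simp [h2] at hc
  have h1 : -(all_nts.length : Int) ≤ i := hin.1
  omega

def recursive_make_genotypes_alt (all_nts : List (List String)) (idx : Int) : List String :=
  let pending := pvCollect all_nts idx []
  pending.reverse.foldl
    (fun gts nts => gts.flatMap (fun gt => nts.map (fun nt => gt ++ nt)))
    (PySem.List.pyGetD all_nts 0 [])

-- ===== PRECONDITION & SPEC =====
-- A recurses forever (RecursionError) for idx < 0 and raises IndexError for idx ≥ len(all_nts),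
-- except that with idx ≥ len(all_nts) an empty list among all_nts empties the intermediate
-- product and A then returns [] without ever touching the out-of-range index; Pre_ excludes that
-- degenerate corner too, because B's index walk raises IndexError there.
def Pre_recursive_make_genotypes (all_nts : List (List String)) (idx : Int) : Prop :=
  0 ≤ idx ∧ idx < all_nts.length
instance (all_nts : List (List String)) (idx : Int) : Decidable (Pre_recursive_make_genotypes all_nts idx) := by unfold Pre_recursive_make_genotypes; infer_instance
def pvWitness_recursive_make_genotypes : List (List String) × Int := ([["A"], ["C", "G"]], 1)

def Spec_recursive_make_genotypes (all_nts : List (List String)) (idx : Int) (out : List String) : Prop := out = recursive_make_genotypes_alt all_nts idx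
instance (all_nts : List (List String)) (idx : Int) (out : List String) : Decidable (Spec_recursive_make_genotypes all_nts idx out) := by unfold Spec_recursive_make_genotypes; infer_instance

-- ===== CLAIM (what is proved, stated in full; the proofs are below) =====
def Claim_equal_recursive_make_genotypes : Prop := ∀ (all_nts : List (List String)) (idx : Int), Dom_recursive_make_genotypes all_nts idx → Pre_recursive_make_genotypes all_nts idx → Spec_recursive_make_genotypes all_nts idx (recursive_make_genotypes all_nts idx)

-- ===== LEMMAS AND PROOFS =====

-- One pass of A's nested append loops is one flat comprehension step of B.
theorem pvStep_eq (nts : List String) (gts : List String) :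
    gts.foldl (fun new_gts gt => nts.foldl (fun acc nt => acc ++ [gt ++ nt]) new_gts) [] =
      gts.flatMap (fun gt => nts.map (fun nt => gt ++ nt)) := by
  simp only [PySem.List.foldl_append_singleton_eq_map, PySem.List.foldl_append_eq_flatMap,
    List.nil_append]

-- A's Nat-recursion as a forward fold over the index range 1..n.
theorem pvGoA_eq_fold (all_nts : List (List String)) (n : Nat) :
    pvGoA all_nts n =
      (PySem.List.pyRange 1 ((n : Int) + 1) 1).foldl
        (fun result i =>
          result.flatMap (fun gt => (PySem.List.pyGetD all_nts i []).map (fun nt => gt ++ nt)))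
        (PySem.List.pyGetD all_nts 0 []) := by
  induction n with
  | zero => simp [pvGoA]
  | succ n ih =>
    have hsplit : PySem.List.pyRange 1 ((n : Int) + 1 + 1) 1
        = PySem.List.pyRange 1 ((n : Int) + 1) 1 ++ [(n : Int) + 1] :=
      PySem.List.pyRange_one_succ_right (by omega)
    rw [show ((n + 1 : Nat) : Int) + 1 = (n : Int) + 1 + 1 by push_cast; ring, hsplit,
        List.foldl_append, ← ih]
    simp only [pvGoA, List.foldl_cons, List.foldl_nil]
    exact pvStep_eq _ _

-- B's collecting loop, inside the range: pending gains all_nts[n], …, all_nts[1] in that order.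
theorem pvCollect_eq (all_nts : List (List String)) (n : Nat)
    (hn : (n : Int) < all_nts.length) (acc : List (List String)) :
    pvCollect all_nts (n : Int) acc =
      acc ++ ((PySem.List.pyRange 1 ((n : Int) + 1) 1).map
        (fun i => PySem.List.pyGetD all_nts i [])).reverse := by
  induction n generalizing acc with
  | zero => rw [pvCollect]; simp
  | succ n ih =>
    have hn' : (n : Int) + 1 < (all_nts.length : Int) := by push_cast at hn ⊢; omega
    have hget : PySem.List.pyGet? all_nts ((n : Int) + 1)
        = some (PySem.List.pyGetD all_nts ((n : Int) + 1) []) := by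
      rw [PySem.List.pyGet?_eq_some_getElem, PySem.List.pyGetD_eq_getElem] <;> omega
    have hsplit : PySem.List.pyRange 1 ((n : Int) + 1 + 1) 1
        = PySem.List.pyRange 1 ((n : Int) + 1) 1 ++ [(n : Int) + 1] :=
      PySem.List.pyRange_one_succ_right (by omega)
    rw [pvCollect]
    push_cast
    rw [if_neg (by omega)]
    split
    · simp_all
    · rename_i nts heq
      rw [hget] at heq
      injection heq with heq'
      rw [← heq', show (n : Int) + 1 - 1 = (n : Int) by ring,
          ih (by omega) (acc ++ [PySem.List.pyGetD all_nts ((n : Int) + 1) []]), hsplit]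
      simp

-- ===== VERDICT (by name: the statement is the Claim_ definition above) =====
theorem recursive_make_genotypes_spec : Claim_equal_recursive_make_genotypes := by
  intro all_nts idx _ hpre
  obtain ⟨h0, hlt⟩ := hpre
  unfold Spec_recursive_make_genotypes recursive_make_genotypes recursive_make_genotypes_alt
  have hidx : idx = ((idx.toNat : Nat) : Int) := (Int.toNat_of_nonneg h0).symm
  rw [if_neg (by omega), hidx]
  simp only [Int.toNat_natCast]
  rw [pvGoA_eq_fold, pvCollect_eq all_nts idx.toNat (by omega) []]
  simp [List.foldl_map]
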